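-- pv_equiv track=rewrite | github.com/qtn-grd/Exam_Ranks_42 | EXAM_RANK_03/string_sculptor.py | sculptor
-- ===== SOURCE A (Python) =====
-- def sculptor(text: str) -> str:
--
--     text = text.lower()
--
--     count = False
--     result = ""
--
--     for char in text:
--         if not char.isalpha():
--             result += char
--         else:
--             if not count:
--                 result += char
--                 count = True
--             else:
--                 char = char.upper()
--                 result += char
--                 count = False
--
--     return result
-- ===== SOURCE B (Python) =====
-- def sculptor(text: str) -> str:
--     low = text.lower()
--     letters = [c.upper() if i % 2 else c
--                for i, c in enumerate(ch for ch in low if ch.isalpha())]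
--     it = iter(letters)
--     return ''.join(next(it) if c.isalpha() else c for c in low)
-- ===== Notes on version B (the rewrite author's own statement) =====
-- stated objective: alternative
-- what changed: Replaces A's single stateful toggle pass (a boolean flipped per letter while appending) with a two-stage filter+merge: first build the alternating-case letters by position from the filtered lowered letters, then merge them back over the original lowered string.
import Mathlib
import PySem

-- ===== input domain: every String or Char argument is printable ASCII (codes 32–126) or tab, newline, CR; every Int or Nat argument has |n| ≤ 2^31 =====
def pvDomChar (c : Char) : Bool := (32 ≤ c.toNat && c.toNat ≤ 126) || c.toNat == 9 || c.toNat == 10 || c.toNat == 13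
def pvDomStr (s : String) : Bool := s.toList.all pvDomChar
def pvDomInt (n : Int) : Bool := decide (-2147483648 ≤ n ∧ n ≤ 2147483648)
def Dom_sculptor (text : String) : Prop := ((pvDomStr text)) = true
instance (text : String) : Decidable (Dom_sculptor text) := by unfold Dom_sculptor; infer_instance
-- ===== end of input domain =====

-- B replaces A's single stateful toggle pass by a filter+transform stage followed by a merge stage (alternative decomposition, same result).

-- ===== PORT A =====
-- A: lower the text, then one pass with a boolean `count` toggled on letters, appending to `result`.
def sculptor (text : String) : String :=
  let t := PySem.Chars.lower text.toList
  let st := t.foldl (fun (st : Bool × List Char) ch =>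
    if !(PySem.Chars.isalpha ch) then (st.1, st.2 ++ [ch])
    else if !st.1 then (true, st.2 ++ [ch])
    else (false, st.2 ++ [PySem.Chars.upperChar ch])) (false, [])
  String.ofList st.2

-- ===== PORT B =====
-- letters transformed by position: index i odd → uppercase
def sculptorAltLetters : List Char → Nat → List Char
  | [], _ => []
  | c :: cs, i => (if i % 2 = 1 then PySem.Chars.upperChar c else c) :: sculptorAltLetters cs (i + 1)

-- merge: scan the lowered string, taking the next transformed letter for each alpha char
-- (`headD c` stands for `next(it)`; the default is unreachable since the letter counts match)
def sculptorMerge : List Char → List Char → List Char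
  | [], _ => []
  | c :: cs, ls =>
    if PySem.Chars.isalpha c then ls.headD c :: sculptorMerge cs ls.tail
    else c :: sculptorMerge cs ls

def sculptor_alt (text : String) : String :=
  let low := PySem.Chars.lower text.toList
  let letters := sculptorAltLetters (low.filter PySem.Chars.isalpha) 0
  String.ofList (sculptorMerge low letters)

-- ===== PRECONDITION & SPEC =====
def Spec_sculptor (text : String) (out : String) : Prop := out = sculptor_alt text
instance (text : String) (out : String) : Decidable (Spec_sculptor text out) := by unfold Spec_sculptor; infer_instance

-- ===== CLAIM (what is proved, stated in full; the proofs are below) =====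
def Claim_equal_sculptor : Prop := ∀ (text : String), Dom_sculptor text → Spec_sculptor text (sculptor text)

-- ===== LEMMAS AND PROOFS =====

theorem sculptor_inv (t : List Char) (b : Bool) (n : Nat) (hb : b = decide (n % 2 = 1))
    (acc : List Char) :
    (t.foldl (fun (st : Bool × List Char) ch =>
      if !(PySem.Chars.isalpha ch) then (st.1, st.2 ++ [ch])
      else if !st.1 then (true, st.2 ++ [ch])
      else (false, st.2 ++ [PySem.Chars.upperChar ch])) (b, acc)).2
    = acc ++ sculptorMerge t (sculptorAltLetters (t.filter PySem.Chars.isalpha) n) := by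
  induction t generalizing b n acc with
  | nil => simp [sculptorMerge]
  | cons c cs ih =>
    by_cases h : PySem.Chars.isalpha c = true
    · rw [List.filter_cons_of_pos h]
      by_cases hp : n % 2 = 1
      · have hb' : b = true := by simp [hb, hp]
        subst hb'
        simp only [List.foldl_cons, h, Bool.not_true, if_false, Bool.false_eq_true,
          sculptorAltLetters, sculptorMerge, hp, if_pos, List.headD, List.tail_cons]
        rw [ih false (n + 1) (by simp; omega) (acc ++ [PySem.Chars.upperChar c])]
        simp
      · have hb' : b = false := by simp [hb, hp]
        subst hb'
        simp only [List.foldl_cons, h, Bool.not_true, Bool.not_false, if_false, if_true,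
          Bool.false_eq_true, sculptorAltLetters, sculptorMerge, hp, List.headD, List.tail_cons]
        rw [ih true (n + 1) (by simp; omega) (acc ++ [c])]
        simp
    · rw [List.filter_cons_of_neg (by simp [h])]
      simp only [List.foldl_cons, h, Bool.not_false, if_true, sculptorMerge, Bool.false_eq_true,
        if_false]
      rw [ih b n hb (acc ++ [c])]
      simp

-- ===== VERDICT (by name: the statement is the Claim_ definition above) =====
theorem sculptor_spec : Claim_equal_sculptor := by
  intro text _
  show _ = _
  unfold sculptor sculptor_alt
  simpa using congrArg String.ofList
    (sculptor_inv (PySem.Chars.lower text.toList) false 0 rfl [])
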